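-- pv_equiv track=rewrite | github.com/TarunNagarajan/TinyQuant | src/selection/block_analysis.py | _structural_fallback
-- ===== SOURCE A (Python) =====
-- from collections import defaultdict, deque
-- from typing import Dict, List, Set, Tuple
--
-- def _structural_fallback(linear_layers: Dict) -> Dict[str, Set[str]]:
--     """
--     Fallback method: infer connections from module hierarchy.
--     Assumes layers in same parent module are connected sequentially.
--     """
--     connections = defaultdict(set)
--
--     # Group layers by parent module
--     parent_groups = defaultdict(list)
--     for name in linear_layers.keys():
--         if '.' in name:
--             parent = '.'.join(name.split('.')[:-1])
--         else:
--             parent = 'root'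
--         parent_groups[parent].append(name)
--
--     # Connect layers within each parent sequentially
--     for parent, layers in parent_groups.items():
--         sorted_layers = sorted(layers)  # Alphabetical = typical execution order
--         for i in range(len(sorted_layers) - 1):
--             connections[sorted_layers[i]].add(sorted_layers[i + 1])
--
--     return connections
-- ===== SOURCE B (Python) =====
-- from collections import defaultdict
--
--
-- def _parent(name):
--     return '.'.join(name.split('.')[:-1]) if '.' in name else 'root'
--
--
-- def _structural_fallback(linear_layers):
--     """One global sort + a single adjacent-pair pass instead of per-parent sorting loops."""
--     names = list(linear_layers.keys())
--     # rank of each parent = order of first appearance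
--     order = {}
--     for n in names:
--         order.setdefault(_parent(n), len(order))
--     # one sort puts each parent's layers contiguously (parents in first-appearance
--     # order, names alphabetical within a parent), then one linear pass links neighbours
--     ranked = sorted(names, key=lambda n: (order[_parent(n)], n))
--     connections = defaultdict(set)
--     for a, b in zip(ranked, ranked[1:]):
--         if _parent(a) == _parent(b):
--             connections[a].add(b)
--     return connections
-- ===== Notes on version B (the rewrite author's own statement) =====
-- stated objective: alternative
-- what changed: A groups names per parent and runs a sort plus an index loop inside every group; B instead ranks parents by first appearance, performs one global sort by (parent rank, name) and links neighbours in a single adjacent-pair pass over the sorted list.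
import Mathlib
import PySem

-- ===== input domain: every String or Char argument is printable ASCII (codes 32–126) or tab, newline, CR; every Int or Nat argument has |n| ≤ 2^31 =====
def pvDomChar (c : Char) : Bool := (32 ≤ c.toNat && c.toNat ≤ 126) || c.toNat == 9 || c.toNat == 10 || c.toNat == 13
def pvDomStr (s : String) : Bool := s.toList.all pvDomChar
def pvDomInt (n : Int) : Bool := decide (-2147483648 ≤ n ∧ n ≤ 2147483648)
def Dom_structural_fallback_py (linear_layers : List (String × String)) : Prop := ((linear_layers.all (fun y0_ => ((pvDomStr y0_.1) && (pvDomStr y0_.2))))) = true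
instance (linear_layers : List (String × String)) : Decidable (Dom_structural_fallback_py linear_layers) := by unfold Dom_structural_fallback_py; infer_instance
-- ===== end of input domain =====

-- B replaces A's per-parent sort-and-index loops by one global sort (parent first-appearance
-- rank, then name) followed by a single adjacent-pair pass; same return value, similar cost.

-- shared helper: parent of a module name = '.'.join(name.split('.')[:-1]) if '.' in name else 'root'
def pvParent (name : String) : String :=
  if PySem.Str.isIn "." name then
    PySem.Str.join "." (((PySem.Str.split? name ".").getD []).dropLast)
  else "root"

-- ===== PORT A =====
def structural_fallback_py (linear_layers : List (String × String)) : List (String × List String) :=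
  let names := (PySem.Dict.ofList linear_layers).keys
  let parent_groups : PySem.Dict String (List String) :=
    names.foldl (fun pg name => pg.modify (pvParent name) [] (fun g => g ++ [name]))
      PySem.Dict.empty
  let connections : PySem.Dict String (PySem.Set String) :=
    parent_groups.items.foldl (fun conn pl =>
      let sl := PySem.List.sorted pl.2 (fun x => x)
      (PySem.List.pyRange 0 (PySem.List.len sl - 1)).foldl (fun conn i =>
        conn.modify (PySem.List.pyGetD sl i "") PySem.Set.empty
          (fun s => PySem.Set.add s (PySem.List.pyGetD sl (i + 1) ""))) conn)
      PySem.Dict.empty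
  connections.items

-- ===== PORT B =====
def structural_fallback_py_alt (linear_layers : List (String × String)) : List (String × List String) :=
  let names := (PySem.Dict.ofList linear_layers).keys
  let order : PySem.Dict String Int :=
    names.foldl (fun d n => d.setdefault (pvParent n) (d.size : Int)) PySem.Dict.empty
  -- order[_parent(n)] is always present; getD is exact here
  let ranked := PySem.List.sorted2 names (fun n => order.getD (pvParent n) 0) (fun n => n)
  let connections : PySem.Dict String (PySem.Set String) :=
    (ranked.zip (PySem.List.slice ranked (some 1))).foldl (fun conn ab =>
      if pvParent ab.1 == pvParent ab.2 then
        conn.modify ab.1 PySem.Set.empty (fun s => PySem.Set.add s ab.2)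
      else conn) PySem.Dict.empty
  connections.items

-- ===== PRECONDITION & SPEC =====
def Spec_structural_fallback_py (linear_layers : List (String × String)) (out : List (String × List String)) : Prop := out = structural_fallback_py_alt linear_layers
instance (linear_layers : List (String × String)) (out : List (String × List String)) : Decidable (Spec_structural_fallback_py linear_layers out) := by unfold Spec_structural_fallback_py; infer_instance

-- ===== CLAIM (what is proved, stated in full; the proofs are below) =====
def Claim_equal_structural_fallback_py : Prop := ∀ (linear_layers : List (String × String)), Dom_structural_fallback_py linear_layers → Spec_structural_fallback_py linear_layers (structural_fallback_py linear_layers)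

-- ===== LEMMAS AND PROOFS =====

-- the layers sharing parent p
def pvGrp (ns : List String) (p : String) : List String := ns.filter (fun n => pvParent n == p)

-- adjacent pairs of a list
def pvAdj {α : Type} (l : List α) : List (α × α) := l.zip l.tail

-- the rank dict built by B's setdefault loop: parent ↦ first-appearance index
def pvRk (Q : List String) : PySem.Dict String Int :=
  PySem.Dict.mk (Q.zipIdx.map (fun pi => (pi.1, (pi.2 : Int))))

-- sorted2 with keys (k1, id) is sorted with the lexicographic key
theorem pv_sorted2_eq_sorted_lex (xs : List String) (k1 : String → Int) :
    PySem.List.sorted2 xs k1 (fun n => n) =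
      PySem.List.sorted xs (fun n => toLex (k1 n, n)) := by
  rw [PySem.List.sorted_eq_foldl_insertBy]
  unfold PySem.List.sorted2
  simp only [if_neg (by decide : ¬ (false = true))]
  congr 1
  funext acc x
  congr 1
  funext a b
  simp only [Prod.Lex.lt_iff, ofLex_toLex]
  rcases lt_trichotomy (k1 a) (k1 b) with h | h | h
  · simp [h, asymm h]
  · simp [h]
  · simp [h, asymm h, h.ne']

-- adjacent pairs of an append
theorem pv_adj_append {α : Type} (xs ys : List α) :
    pvAdj (xs ++ ys) =
      pvAdj xs ++ (xs.getLast?.bind (fun a => ys.head?.map (fun c => (a, c)))).toList ++ pvAdj ys := by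
  induction xs with
  | nil => simp [pvAdj]
  | cons a t ih =>
    cases t with
    | nil =>
      cases ys with
      | nil => simp [pvAdj]
      | cons c u => simp [pvAdj]
    | cons b t' =>
      simp only [List.cons_append, pvAdj, List.tail_cons, List.zip_cons_cons] at *
      simp [ih]

theorem pv_mem_adj {α : Type} {l : List α} {ab : α × α} (h : ab ∈ pvAdj l) :
    ab.1 ∈ l ∧ ab.2 ∈ l := by
  obtain ⟨h1, h2⟩ := List.of_mem_zip (show (ab.1, ab.2) ∈ l.zip l.tail from h)
  exact ⟨h1, List.mem_of_mem_tail h2⟩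

-- adjacent pairs as an index map
theorem pv_adj_eq_map_range (l : List String) :
    pvAdj l = (List.range (l.length - 1)).map (fun i => (l.getD i "", l.getD (i + 1) "")) := by
  apply List.ext_getElem
  · simp [pvAdj, List.length_zip]
  · intro i hi1 hi2
    simp only [pvAdj, List.length_zip, List.length_tail] at hi1
    have hil : i < l.length - 1 := by omega
    simp only [pvAdj, List.getElem_zip, List.getElem_map, List.getElem_range, List.getElem_tail]
    rw [List.getD_eq_getElem?_getD, List.getD_eq_getElem?_getD,
      List.getElem?_eq_getElem (by omega), List.getElem?_eq_getElem (by omega)]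
    simp

-- A's inner range loop is the adjacent-pair fold
theorem pv_inner_loop_eq (sl : List String) (c : PySem.Dict String (PySem.Set String)) :
    (PySem.List.pyRange 0 (PySem.List.len sl - 1)).foldl (fun conn i =>
        conn.modify (PySem.List.pyGetD sl i "") PySem.Set.empty
          (fun s => PySem.Set.add s (PySem.List.pyGetD sl (i + 1) ""))) c =
      (pvAdj sl).foldl (fun conn ab =>
        conn.modify ab.1 PySem.Set.empty (fun s => PySem.Set.add s ab.2)) c := by
  cases sl with
  | nil => rfl
  | cons x t =>
    have hlen : PySem.List.len (x :: t) - 1 = ((t.length : Nat) : Int) := by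
      simp [PySem.List.len]
    rw [hlen, PySem.List.pyRange_zero_natCast, List.foldl_map,
      pv_adj_eq_map_range, List.foldl_map]
    apply PySem.List.foldl_congr_mem
    intro acc i hi
    have h1 : PySem.List.pyGetD (x :: t) (i : Int) "" = (x :: t).getD i "" :=
      PySem.List.pyGetD_natCast _ _ _
    have h2 : PySem.List.pyGetD (x :: t) ((i : Int) + 1) "" = (x :: t).getD (i + 1) "" := by
      rw [show ((i : Int) + 1) = ((i + 1 : Nat) : Int) by push_cast; ring]
      exact PySem.List.pyGetD_natCast _ _ _
    simp [h1, h2]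

theorem pv_keys_pvRk (Q : List String) : (pvRk Q).keys = Q := by
  simp [pvRk, PySem.Dict.keys, List.map_map]
  exact List.zipIdx_map_fst 0 Q

-- the setdefault loop builds exactly the rank dict
theorem pv_foldl_setdefault (ps Q : List String) :
    ps.foldl (fun d p => d.setdefault p (d.size : Int)) (pvRk Q) =
      pvRk (PySem.Set.update Q ps) := by
  induction ps generalizing Q with
  | nil => simp [PySem.Set.update]
  | cons p t ih =>
    have hupd : PySem.Set.update Q (p :: t) = PySem.Set.update (PySem.Set.add Q p) t := by
      simp [PySem.Set.update]
    have hcont : (pvRk Q).contains p = decide (p ∈ Q) := by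
      rw [PySem.Dict.contains_eq_decide_mem_keys, pv_keys_pvRk]
    by_cases hm : p ∈ Q
    · have hstep : (pvRk Q).setdefault p ((pvRk Q).size : Int) = pvRk Q :=
        PySem.Dict.setdefault_of_contains _ _ (by simp [hcont, hm])
      have hadd : PySem.Set.add Q p = Q := by simp [PySem.Set.add, PySem.Set.contains, hm]
      rw [List.foldl_cons, hstep, ih, hupd, hadd]
    · have hstep : (pvRk Q).setdefault p ((pvRk Q).size : Int) = pvRk (Q ++ [p]) := by
        rw [PySem.Dict.setdefault_of_not_contains _ _ (by simp [hcont, hm])]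
        apply PySem.Dict.ext
        rw [PySem.Dict.items_insert_of_not_contains _ _ (by simp [hcont, hm])]
        simp only [pvRk, List.zipIdx_append, List.map_append]
        simp [List.zipIdx, PySem.Dict.size]
      have hadd : PySem.Set.add Q p = Q ++ [p] := by
        simp [PySem.Set.add, PySem.Set.contains, hm]
      rw [List.foldl_cons, hstep, ih, hupd, hadd]

theorem pv_getD_pvRk (Q : List String) (hQ : Q.Nodup) (i : Nat) (hi : i < Q.length) :
    (pvRk Q).getD Q[i] 0 = (i : Int) := by
  apply PySem.Dict.getD_of_mem_items
  · apply List.mem_map.mpr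
    refine ⟨(Q[i], i), ?_, rfl⟩
    have h : (Q.zipIdx)[i]'(by simp [hi]) = (Q[i], i) := by
      simp [List.getElem_zipIdx (l := Q) (j := 0) (i := i)]
    exact h ▸ List.getElem_mem _
  · rw [pv_keys_pvRk]; exact hQ

-- grouping by parent is a permutation of the filtered source
theorem pv_filter_partition_perm (ns : List String) (p : String) (ps : List String) (hp : p ∉ ps) :
    (ns.filter (fun n => pvParent n == p) ++ ns.filter (fun n => decide (pvParent n ∈ ps))).Perm
      (ns.filter (fun n => decide (pvParent n ∈ p :: ps))) := by
  induction ns with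
  | nil => simp
  | cons n t ih =>
    simp only [List.mem_cons] at ih ⊢
    by_cases h1 : pvParent n = p
    · have h2 : pvParent n ∉ ps := by rw [h1]; exact hp
      simp only [List.filter_cons, h1, beq_self_eq_true, if_pos, or_false,
        decide_true, decide_false, Bool.false_eq_true, if_false, List.cons_append, hp]
      exact ih.cons n
    · by_cases h2 : pvParent n ∈ ps
      · simp only [List.filter_cons, beq_iff_eq, h1, if_false,
          h2, decide_true, if_true, or_true]
        exact List.perm_middle.trans (ih.cons n)
      · simp only [List.filter_cons, beq_iff_eq, h1, h2, if_false, or_self]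
        simpa [h1, h2] using ih

theorem pv_flatten_groups_perm (ps : List String) (ns : List String) (hnd : ps.Nodup) :
    ((ps.map (fun p => PySem.List.sorted (pvGrp ns p) (fun x => x))).flatten).Perm
      (ns.filter (fun n => decide (pvParent n ∈ ps))) := by
  induction ps with
  | nil => simp
  | cons p t ih =>
    simp only [List.map_cons, List.flatten_cons]
    have hp : p ∉ t := (List.nodup_cons.mp hnd).1
    refine ((PySem.List.sorted_perm (pvGrp ns p) (fun x => x) false).append
      (ih (List.nodup_cons.mp hnd).2)).trans ?_
    exact pv_filter_partition_perm ns p t hp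

-- the same-parent filter of the adjacent pairs of a parent-blocked list
theorem pv_adj_flatten_filter (ps : List String) (Bf : String → List String)
    (hnd : ps.Nodup) (hB : ∀ p ∈ ps, Bf p ≠ [] ∧ ∀ x ∈ Bf p, pvParent x = p) :
    ((pvAdj ((ps.map Bf).flatten)).filter (fun ab => pvParent ab.1 == pvParent ab.2)) =
      (ps.map (fun p => pvAdj (Bf p))).flatten := by
  induction ps with
  | nil => simp [pvAdj]
  | cons p t ih =>
    simp only [List.map_cons, List.flatten_cons]
    rw [pv_adj_append, List.filter_append, List.filter_append]
    have hblock : (pvAdj (Bf p)).filter (fun ab => pvParent ab.1 == pvParent ab.2) = pvAdj (Bf p) := by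
      apply List.filter_eq_self.mpr
      intro ab hab
      obtain ⟨ha, hb⟩ := pv_mem_adj hab
      rw [(hB p (by simp)).2 ab.1 ha, (hB p (by simp)).2 ab.2 hb]
      simp
    have hmid : ((Bf p).getLast?.bind
        (fun a => ((t.map Bf).flatten).head?.map (fun c => (a, c)))).toList.filter
          (fun ab => pvParent ab.1 == pvParent ab.2) = [] := by
      cases hl : (Bf p).getLast? with
      | none => simp
      | some a =>
        cases hh : ((t.map Bf).flatten).head? with
        | none => simp
        | some c =>
          have hc : c ∈ (t.map Bf).flatten := List.mem_of_mem_head? hh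
          obtain ⟨l, hl2, hcl⟩ := List.mem_flatten.mp hc
          obtain ⟨q, hq, rfl⟩ := List.mem_map.mp hl2
          have hpc : pvParent c = q := (hB q (by simp [hq])).2 c hcl
          have hpa : pvParent a = p := (hB p (by simp)).2 a (List.mem_of_getLast? hl)
          have hne : p ≠ q := fun h => (List.nodup_cons.mp hnd).1 (h ▸ hq)
          simp [hpa, hpc, hne]
    rw [hblock, hmid, List.append_nil,
      ih (List.nodup_cons.mp hnd).2 (fun q hq => hB q (by simp [hq]))]

-- the sorted blocks are pairwise increasing under the lexicographic (rank, name) key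
theorem pv_flat_pairwise (ns P : List String) (r : String → Int)
    (hns : ns.Nodup) (hPr : P.Pairwise (fun p q => r p < r q)) :
    ((P.map (fun p => PySem.List.sorted (pvGrp ns p) (fun x => x))).flatten).Pairwise
      (fun a b => toLex (r (pvParent a), a) < toLex (r (pvParent b), b)) := by
  apply List.pairwise_flatten.mpr
  constructor
  · intro l hl
    obtain ⟨p, hp, rfl⟩ := List.mem_map.mp hl
    have hmem : ∀ x ∈ PySem.List.sorted (pvGrp ns p) (fun x => x), pvParent x = p := by
      intro x hx
      have := (PySem.List.mem_sorted _ _ _ x).mp hx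
      simp [pvGrp] at this
      exact this.2
    have hnd : (PySem.List.sorted (pvGrp ns p) (fun x => x)).Nodup :=
      ((PySem.List.sorted_perm (pvGrp ns p) (fun x => x) false).nodup_iff).mpr
        (hns.filter _)
    have hle := PySem.List.sorted_pairwise (pvGrp ns p) (fun x => x)
    refine (hle.and hnd).imp_of_mem ?_
    intro a b ha hb hab
    rw [Prod.Lex.lt_iff]
    right
    constructor
    · simp [hmem a ha, hmem b hb]
    · simpa using lt_of_le_of_ne hab.1 hab.2
  · apply List.pairwise_map.mpr
    refine hPr.imp ?_
    intro p q hpq x hx y hy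
    have hxp : pvParent x = p := by
      have := (PySem.List.mem_sorted _ _ _ x).mp hx
      simpa [pvGrp] using (List.mem_filter.mp this).2
    have hyq : pvParent y = q := by
      have := (PySem.List.mem_sorted _ _ _ y).mp hy
      simpa [pvGrp] using (List.mem_filter.mp this).2
    rw [Prod.Lex.lt_iff]
    left
    simpa [hxp, hyq] using hpq

-- A's grouping loop: its items are the parents with their groups
theorem pv_pg_items (ns : List String) :
    (ns.foldl (fun pg name => pg.modify (pvParent name) [] (fun g => g ++ [name]))
        PySem.Dict.empty).items
      = (PySem.Set.ofList (ns.map pvParent)).map (fun p => (p, pvGrp ns p)) := by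
  have hkeys : (ns.foldl (fun pg name => pg.modify (pvParent name) [] (fun g => g ++ [name]))
      PySem.Dict.empty).keys = PySem.Set.ofList (ns.map pvParent) := by
    rw [PySem.Dict.keys_foldl_modify_key ns pvParent [] (fun _ n => fun g => g ++ [n])
      PySem.Dict.empty]
    rfl
  have hnd := hkeys ▸ PySem.Set.nodup_ofList (ns.map pvParent)
  rw [PySem.Dict.items_eq_map_keys _ hnd [], hkeys]
  apply List.map_congr_left
  intro p hp
  have hfold : (ns.foldl (fun pg name => pg.modify (pvParent name) [] (fun g => g ++ [name]))
      PySem.Dict.empty)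
      = (ns.map (fun n => (pvParent n, n))).foldl
          (fun d q => d.modify q.1 [] (fun g => g ++ [q.2])) PySem.Dict.empty := by
    rw [List.foldl_map]
  rw [hfold, PySem.Dict.getD_foldl_modify_append, PySem.Dict.getD_empty, List.nil_append,
    List.filter_map]
  simp only [List.map_map]
  rw [show ((fun (x : String × String) => x.2) ∘ fun n => (pvParent n, n)) = id from rfl,
    List.map_id]
  rfl

-- ===== VERDICT (by name: the statement is the Claim_ definition above) =====
theorem structural_fallback_py_spec : Claim_equal_structural_fallback_py := by
  intro ls _hdom
  unfold Spec_structural_fallback_py structural_fallback_py structural_fallback_py_alt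
  simp only []
  set ns := (PySem.Dict.ofList ls).keys with hns_def
  have hns : ns.Nodup := PySem.Dict.nodup_keys_ofList ls
  set P := PySem.Set.ofList (ns.map pvParent) with hP_def
  have hPnd : P.Nodup := PySem.Set.nodup_ofList _
  have hmemP : ∀ n ∈ ns, pvParent n ∈ P := fun n hn =>
    (PySem.Set.mem_ofList _ _).mpr (List.mem_map_of_mem hn)
  -- B's rank dict is pvRk P
  have hord : ns.foldl (fun d n => d.setdefault (pvParent n) ((d.size : Int)))
      PySem.Dict.empty = pvRk P := by
    have : ns.foldl (fun d n => d.setdefault (pvParent n) ((d.size : Int))) PySem.Dict.empty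
        = (ns.map pvParent).foldl (fun d p => d.setdefault p ((d.size : Int))) (pvRk []) := by
      rw [List.foldl_map]; rfl
    rw [this, pv_foldl_setdefault]; rfl
  -- ranks are increasing along P
  have hPr : P.Pairwise (fun p q => (pvRk P).getD p 0 < (pvRk P).getD q 0) := by
    apply List.pairwise_iff_getElem.mpr
    intro i j hi hj hij
    rw [pv_getD_pvRk P hPnd i hi, pv_getD_pvRk P hPnd j hj]
    exact_mod_cast hij
  -- the blocked list
  have hperm : ((P.map (fun p => PySem.List.sorted (pvGrp ns p) (fun x => x))).flatten).Perm ns := by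
    have h := pv_flatten_groups_perm P ns hPnd
    rwa [List.filter_eq_self.mpr (fun n hn => by simpa using hmemP n hn)] at h
  have hS : PySem.List.sorted2 ns (fun n => (pvRk P).getD (pvParent n) 0) (fun n => n)
      = (P.map (fun p => PySem.List.sorted (pvGrp ns p) (fun x => x))).flatten := by
    rw [pv_sorted2_eq_sorted_lex]
    exact PySem.List.sorted_eq_of_perm_of_pairwise_lt ns _ _ hperm
      (pv_flat_pairwise ns P (fun p => (pvRk P).getD p 0) hns hPr)
  have hB : ∀ p ∈ P, PySem.List.sorted (pvGrp ns p) (fun x => x) ≠ [] ∧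
      ∀ x ∈ PySem.List.sorted (pvGrp ns p) (fun x => x), pvParent x = p := by
    intro p hp
    constructor
    · rw [Ne, PySem.List.sorted_eq_nil_iff]
      obtain ⟨n, hn, rfl⟩ := List.mem_map.mp ((PySem.Set.mem_ofList _ _).mp hp)
      exact List.ne_nil_of_mem (List.mem_filter.mpr ⟨hn, by simp⟩)
    · intro x hx
      have := (PySem.List.mem_sorted _ _ _ x).mp hx
      simpa [pvGrp] using (List.mem_filter.mp this).2
  -- A's connections fold = the blocked adjacent-pair fold
  have hA : (ns.foldl (fun pg name => pg.modify (pvParent name) [] (fun g => g ++ [name]))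
        PySem.Dict.empty).items.foldl (fun conn pl =>
        (PySem.List.pyRange 0 (PySem.List.len (PySem.List.sorted pl.2 (fun x => x)) - 1)).foldl
          (fun conn i =>
            conn.modify (PySem.List.pyGetD (PySem.List.sorted pl.2 (fun x => x)) i "")
              PySem.Set.empty
              (fun s => PySem.Set.add s
                (PySem.List.pyGetD (PySem.List.sorted pl.2 (fun x => x)) (i + 1) ""))) conn)
        (PySem.Dict.empty : PySem.Dict String (PySem.Set String))
      = ((P.map (fun p => pvAdj (PySem.List.sorted (pvGrp ns p) (fun x => x)))).flatten).foldl
          (fun conn ab => conn.modify ab.1 PySem.Set.empty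
            (fun s => PySem.Set.add s ab.2)) PySem.Dict.empty := by
    rw [pv_pg_items ns]
    simp only [pv_inner_loop_eq]
    rw [List.foldl_flatten, List.foldl_map, List.foldl_map]
  -- B's connections fold is the same fold
  have hB2 : (PySem.List.sorted2 ns (fun n => (pvRk P).getD (pvParent n) 0) (fun n => n)).zip
        (PySem.List.slice (PySem.List.sorted2 ns (fun n => (pvRk P).getD (pvParent n) 0)
          (fun n => n)) (some 1))
      = pvAdj (PySem.List.sorted2 ns (fun n => (pvRk P).getD (pvParent n) 0) (fun n => n)) := by
    rw [PySem.List.slice_from _ (by norm_num)]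
    norm_num [pvAdj, List.drop_one]
  rw [hA, hord, hB2, hS]
  congr 1
  rw [PySem.List.foldl_if_eq_foldl_filter
    (p := fun ab : String × String => pvParent ab.1 == pvParent ab.2),
    pv_adj_flatten_filter P _ hPnd hB]
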